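-- pv_equiv track=rewrite | github.com/Szlafrok/Python | Lekcja11/Poprawione/rozwiazania.py | ciag
-- ===== SOURCE A (Python) =====
-- import math # Robię to SPECJALNIE, zamiast "from math import sqrt" żebyście zobaczyli, jak się odwołuje do funkcji z modułu!
--
-- def is_prime(n): # Wyjaśnialiśmy optymalizację do funkcji sprawdzającej, czy liczba jest pierwsza na zajęciach!
--     if n < 2: return False
--     if n == 2: return True
--     if n % 2 == 0: return False
--     d = 3
--     s = math.sqrt(n) # !!!!!!!
--     while d <= s:
--         if n % d == 0:
--             return False
--         d += 2 # Pamiętamy, aby zwiększać indeks! O 2, bo liczby parzyste sprawdziliśmy, więc sprawdzamy nieparzyste: 3, 5, 7...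
--     return True # Jeżeli nie znaleźliśmy dzielników liczby to znaczy, że jest pierwsza
--
-- def ciag(liczby):
--     seq_len = 0 # Tu przechowujemy aktualną długość ciągu
--     max_len = 0 # Tu przechowujemy najdłuższy dotychczasowy ciąg
--
--     for l in liczby: # Dla każdego elementu w liście liczby
--         if is_prime(l): # Jeżeli pierwsza
--             seq_len += 1 # Jeżeli poprzednia nie była pierwsza, to seq_len = 1. W przeciwnym razie po prostu dodajemy 1. Rezultat taki sam :P
--             max_len = max(seq_len, max_len) # Jeżeli seq_len > max_len to max_len = seq_len. W przeciwnym razie bez zmian.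
--         else: # Jeżeli niepierwsza
--             seq_len = 0
--
--     return max_len
-- ===== SOURCE B (Python) =====
-- import math
--
-- def _is_prime(n):
--     # trial division by every d up to isqrt(n)
--     return n >= 2 and all(n % d for d in range(2, math.isqrt(n) + 1))
--
-- def ciag(liczby):
--     # Stage 1+2: build a run-length encoding of the primality flags.
--     rle = []
--     for x in liczby:
--         p = _is_prime(x)
--         if rle and rle[-1][0] == p:
--             rle[-1] = (p, rle[-1][1] + 1)
--         else:
--             rle.append((p, 1))
--     # Stage 3: the answer is the longest run keyed True.
--     return max((n for p, n in rle if p), default=0)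
-- ===== Notes on version B (the rewrite author's own statement) =====
-- stated objective: alternative
-- what changed: Replaces A's single-pass running-counter-with-reset accumulator by a staged decomposition: map the list to primality flags, then recursively split off each maximal run of equal flags and take the max length over the True runs; is_prime itself is rewritten as an all() over range(2, isqrt(n)+1) instead of A's odd-step while loop against math.sqrt.
import Mathlib
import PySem

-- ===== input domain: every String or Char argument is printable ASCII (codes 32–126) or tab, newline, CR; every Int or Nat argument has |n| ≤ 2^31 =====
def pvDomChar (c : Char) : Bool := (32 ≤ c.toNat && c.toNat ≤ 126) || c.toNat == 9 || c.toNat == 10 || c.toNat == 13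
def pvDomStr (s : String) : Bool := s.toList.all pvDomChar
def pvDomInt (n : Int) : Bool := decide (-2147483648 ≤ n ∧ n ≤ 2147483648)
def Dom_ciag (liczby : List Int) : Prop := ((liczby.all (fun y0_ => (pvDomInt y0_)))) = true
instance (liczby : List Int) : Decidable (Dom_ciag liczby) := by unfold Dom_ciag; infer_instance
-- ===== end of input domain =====

-- B replaces A's running-counter-with-reset fold by a staged decomposition: map to primality
-- flags, build a run-length encoding, reduce over the True runs; its primality test is an
-- all() over range(2, isqrt(n)+1) instead of A's odd-step while loop. Same cost ("alternative").

-- ===== PORT A =====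
-- A's `while d <= math.sqrt(n)` is ported as the exact integer condition d*d ≤ n:
-- for 2 < n ≤ 2^31 (the stated domain) sqrt is correctly rounded and n is exactly representable,
-- so the rounded sqrt can cross an integer d only at n = d*d, where it is exact; the tests agree.
def isPrimeLoop (n d : Int) : Bool :=
  if d * d ≤ n then
    if PySem.Int.mod n d == 0 then false
    else isPrimeLoop n (d + 2)
  else true
termination_by (n + 2 - d).toNat
decreasing_by
  rename_i h
  have h1 : 0 ≤ d * (d - 1) := by
    rcases Int.le_total d 0 with h0 | h0
    · nlinarith [mul_nonneg (neg_nonneg.mpr h0) (neg_nonneg.mpr (show d - 1 ≤ 0 by omega))]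
    · rcases Int.lt_or_le d 1 with h2 | h2
      · have hd0 : d = 0 := by omega
        simp [hd0]
      · exact mul_nonneg (by omega) (by omega)
  have hd : d ≤ d * d := by nlinarith
  omega

def isPrime (n : Int) : Bool :=
  if n < 2 then false
  else if n == 2 then true
  else if PySem.Int.mod n 2 == 0 then false
  else isPrimeLoop n 3

def ciagLoop (xs : List Int) (seqLen maxLen : Int) : Int :=
  match xs with
  | [] => maxLen
  | l :: rest =>
    if isPrime l then ciagLoop rest (seqLen + 1) (max (seqLen + 1) maxLen)
    else ciagLoop rest 0 maxLen

def ciag (liczby : List Int) : Int := ciagLoop liczby 0 0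

-- ===== PORT B =====
-- `n >= 2 and all(n % d for d in range(2, math.isqrt(n) + 1))`; math.isqrt = Nat.sqrt on 0 ≤ n,
-- only evaluated (short-circuit `and`) when 2 ≤ n; truthiness of `n % d` is `≠ 0`.
def isPrimeB (n : Int) : Bool :=
  if 2 ≤ n then
    (PySem.List.pyRange 2 ((Nat.sqrt n.toNat : Int) + 1) 1).all (fun d => PySem.Int.mod n d != 0)
  else false

-- one iteration of B's RLE-building loop body (rle[-1] update / append)
def rleStep (rle : List (Bool × Int)) (p : Bool) : List (Bool × Int) :=
  match rle.getLast? with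
  | some (q, m) => if q == p then rle.dropLast ++ [(p, m + 1)] else rle ++ [(p, 1)]
  | none => rle ++ [(p, 1)]

-- `max((n for p, n in rle if p), default=0)` → PySem.List.max? (first extremal) with default 0
def ciag_alt (liczby : List Int) : Int :=
  let rle := liczby.foldl (fun acc x => rleStep acc (isPrimeB x)) []
  (PySem.List.max? (rle.filterMap (fun g => if g.1 then some g.2 else none)) (fun y => y)).getD 0

-- ===== PRECONDITION & SPEC =====
def Spec_ciag (liczby : List Int) (out : Int) : Prop := out = ciag_alt liczby
instance (liczby : List Int) (out : Int) : Decidable (Spec_ciag liczby out) := by unfold Spec_ciag; infer_instance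

-- ===== CLAIM (what is proved, stated in full; the proofs are below) =====
def Claim_equal_ciag : Prop := ∀ (liczby : List Int), Dom_ciag liczby → Spec_ciag liczby (ciag liczby)

-- ===== LEMMAS AND PROOFS =====

-- ---- equality of the two primality tests ----

theorem isPrimeLoop_iff (n : Int) (hn : 3 ≤ n) :
    ∀ (fuel : Nat) (d : Int), (n + 2 - d).toNat ≤ fuel → 3 ≤ d → d % 2 = 1 →
      (isPrimeLoop n d = true ↔ ∀ e : Int, d ≤ e → e * e ≤ n → e % 2 = 1 → ¬ (e ∣ n)) := by
  intro fuel
  induction fuel with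
  | zero =>
    intro d hf hd hodd
    have hdn : n + 2 ≤ d := by omega
    have hdd : ¬ (d * d ≤ n) := by nlinarith
    rw [isPrimeLoop]
    simp only [hdd, if_false, true_iff]
    intro e he hee heodd hdvd
    nlinarith
  | succ fuel ih =>
    intro d hf hd hodd
    rw [isPrimeLoop]
    by_cases hdd : d * d ≤ n
    · have hdn : d ≤ n := by nlinarith
      simp only [hdd, if_true]
      by_cases hdvd : (d : Int) ∣ n
      · have hm : PySem.Int.mod n d = 0 := (PySem.Int.mod_eq_zero_iff_dvd n d).mpr hdvd
        simp only [hm, beq_self_eq_true, if_true]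
        constructor
        · intro h; exact absurd h (by simp)
        · intro h; exact absurd hdvd (h d le_rfl hdd hodd)
      · have hm : PySem.Int.mod n d ≠ 0 := fun h => hdvd ((PySem.Int.mod_eq_zero_iff_dvd n d).mp h)
        simp only [beq_iff_eq, hm, if_false]
        rw [ih (d + 2) (by omega) (by omega) (by omega)]
        constructor
        · intro h e he hee heodd
          rcases Int.lt_or_le e (d + 2) with h2 | h2
          · have : e = d ∨ e = d + 1 := by omega
            rcases this with rfl | rfl
            · exact hdvd
            · omega
          · exact h e h2 hee heodd
        · intro h e he hee heodd
          exact h e (by omega) hee heodd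
    · have hdn : n < d * d := by omega
      simp only [hdd, if_false, true_iff]
      intro e he hee heodd hdvd
      nlinarith

theorem sq_le_sqrt_iff (n e : Int) (hn : 0 ≤ n) (he : 0 ≤ e) :
    e * e ≤ n ↔ e ≤ (Nat.sqrt n.toNat : Int) := by
  obtain ⟨a, rfl⟩ := Int.eq_ofNat_of_zero_le he
  obtain ⟨b, rfl⟩ := Int.eq_ofNat_of_zero_le hn
  have h1 : ((a : Int) * a) = ((a * a : Nat) : Int) := by push_cast; ring
  rw [h1, Int.toNat_natCast]
  constructor
  · intro h
    exact_mod_cast Nat.le_sqrt.mpr (by exact_mod_cast h)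
  · intro h
    exact_mod_cast Nat.le_sqrt.mp (by exact_mod_cast h)

theorem isPrimeB_iff (n : Int) (hn : 2 ≤ n) :
    isPrimeB n = true ↔ ∀ e : Int, 2 ≤ e → e * e ≤ n → ¬ (e ∣ n) := by
  unfold isPrimeB
  simp only [hn, if_pos, List.all_eq_true]
  constructor
  · intro h e he hee hdvd
    have hes : e ≤ (Nat.sqrt n.toNat : Int) :=
      (sq_le_sqrt_iff n e (by omega) (by omega)).mp hee
    have hmem : e ∈ PySem.List.pyRange 2 ((Nat.sqrt n.toNat : Int) + 1) 1 :=
      (PySem.List.mem_pyRange_one).mpr ⟨he, by omega⟩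
    have := h e hmem
    simp only [bne_iff_ne, ne_eq] at this
    exact this ((PySem.Int.mod_eq_zero_iff_dvd n e).mpr hdvd)
  · intro h e hmem
    obtain ⟨h1, h2⟩ := (PySem.List.mem_pyRange_one).mp hmem
    have hee : e * e ≤ n :=
      (sq_le_sqrt_iff n e (by omega) (by omega)).mpr (by omega)
    simp only [bne_iff_ne, ne_eq]
    intro hm
    exact h e h1 hee ((PySem.Int.mod_eq_zero_iff_dvd n e).mp hm)

theorem isPrime_eq (n : Int) : isPrime n = isPrimeB n := by
  unfold isPrime
  by_cases h2 : n < 2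
  · have : ¬ (2 ≤ n) := by omega
    simp [h2, isPrimeB, this]
  · have h2 : 2 ≤ n := by omega
    by_cases he : n = 2
    · subst he
      have hs : Nat.sqrt 2 = 1 := by
        have h1 := Nat.sqrt_le 2
        have h2 : 1 ≤ Nat.sqrt 2 := Nat.le_sqrt.mpr (by norm_num)
        nlinarith
      have hb : isPrimeB 2 = true := by
        unfold isPrimeB
        rw [if_pos (by norm_num), show ((2:Int).toNat) = 2 from rfl, hs]
        rw [show ((1:Nat):Int) + 1 = 2 by norm_num]
        rw [PySem.List.pyRange_one_eq_nil le_rfl]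
        rfl
      simp [hb]
    · have h3 : 3 ≤ n := by omega
      by_cases hev : (2 : Int) ∣ n
      · have hm : PySem.Int.mod n 2 = 0 := (PySem.Int.mod_eq_zero_iff_dvd n 2).mpr hev
        have hb : isPrimeB n = false := by
          rw [Bool.eq_false_iff]
          intro h
          exact (isPrimeB_iff n h2).mp h 2 le_rfl (by omega) hev
        rw [if_neg (show ¬ n < 2 by omega), if_neg (by simp [he]), if_pos (by simp [hev]), hb]
      · have hm : PySem.Int.mod n 2 ≠ 0 := fun h => hev ((PySem.Int.mod_eq_zero_iff_dvd n 2).mp h)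
        have hodd : n % 2 = 1 := by omega
        simp only [show ¬ (n < 2) by omega, if_false, beq_iff_eq, he, hm]
        have hl := isPrimeLoop_iff n h3 (n + 2 - 3).toNat 3 le_rfl le_rfl (by decide)
        have hb := isPrimeB_iff n h2
        rw [Bool.eq_iff_iff, hl, hb]
        constructor
        · intro h e he hee hdvd
          have heodd : e % 2 = 1 := by
            rcases Int.emod_two_eq_zero_or_one e with h0 | h1
            · exact absurd (dvd_trans (Int.dvd_of_emod_eq_zero h0) hdvd) hev
            · exact h1
          exact h e (by omega) hee heodd hdvd
        · intro h e he hee _ hdvd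
          exact h e (by omega) hee hdvd

-- ---- A's fold equals B's RLE reduction ----

def pick (g : Bool × Int) : Option Int := if g.1 then some g.2 else none

def maxTrue (rle : List (Bool × Int)) : Int := (rle.filterMap pick).foldl max 0

def tailTrue (rle : List (Bool × Int)) : Int :=
  match rle.getLast? with
  | some (true, m) => m
  | _ => 0

def RLEInv (rle : List (Bool × Int)) (s m : Int) : Prop :=
  s = tailTrue rle ∧ m = maxTrue rle ∧ ∀ g ∈ rle, 1 ≤ g.2

theorem maxTrue_concat (X : List (Bool × Int)) (p : Bool) (k : Int) :
    maxTrue (X ++ [(p, k)]) = if p then max (maxTrue X) k else maxTrue X := by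
  unfold maxTrue
  rw [List.filterMap_append]
  cases p <;> simp [pick, List.foldl_append]

theorem tailTrue_concat (X : List (Bool × Int)) (p : Bool) (k : Int) :
    tailTrue (X ++ [(p, k)]) = if p then k else 0 := by
  unfold tailTrue
  rw [List.getLast?_concat]
  cases p <;> simp

theorem RLEInv_step (rle : List (Bool × Int)) (s m : Int) (p : Bool) (h : RLEInv rle s m) :
    RLEInv (rleStep rle p) (if p then s + 1 else 0) (if p then max (s + 1) m else m) := by
  obtain ⟨hs, hm, hc⟩ := h
  cases hlast : rle.getLast? with
  | none =>
    have hnil : rle = [] := List.getLast?_eq_none_iff.mp hlast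
    subst hnil
    have hs0 : s = 0 := by simpa [tailTrue] using hs
    have hm0 : m = 0 := by simpa [maxTrue] using hm
    subst hs0; subst hm0
    have hr : rleStep [] p = [(p, 1)] := by unfold rleStep; rfl
    rw [hr]
    refine ⟨?_, ?_, ?_⟩
    · cases p <;> rfl
    · cases p <;> simp [maxTrue, pick, List.filterMap]
    · intro g hg; simp at hg; subst hg; simp
  | some qm =>
    obtain ⟨q, k⟩ := qm
    have hne : rle ≠ [] := by
      intro h; subst h; simp at hlast
    have hsplit : rle = rle.dropLast ++ [(q, k)] := by
      conv_lhs => rw [← List.dropLast_concat_getLast hne]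
      congr 1
      simp [List.getLast?_eq_getLast_of_ne_nil hne] at hlast
      simp [hlast]
    have hk1 : 1 ≤ k := hc (q, k) (by rw [hsplit]; simp)
    have htail : tailTrue rle = if q then k else 0 := by
      rw [hsplit, tailTrue_concat]
    have hmax : maxTrue rle = if q then max (maxTrue rle.dropLast) k else maxTrue rle.dropLast := by
      conv_lhs => rw [hsplit]
      rw [maxTrue_concat]
    rw [htail] at hs
    have hr : rleStep rle p = if (q == p) = true then rle.dropLast ++ [(p, k + 1)] else rle ++ [(p, 1)] := by
      unfold rleStep; rw [hlast]
    rw [hr]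
    by_cases hqp : q = p
    · subst hqp
      have hif : (q == q) = true := by simp
      rw [hif, if_pos rfl]
      refine ⟨?_, ?_, ?_⟩
      · rw [tailTrue_concat]
        cases q <;> simp at hs ⊢ <;> omega
      · rw [maxTrue_concat]
        rw [hmax] at hm
        cases q <;> simp at hs hm ⊢
        · exact hm
        · omega
      · intro g hg
        rcases List.mem_append.mp hg with h1 | h1
        · exact hc g (by rw [hsplit]; exact List.mem_append.mpr (Or.inl h1))
        · simp at h1; subst h1; simp; omega
    · have hif : (q == p) = false := beq_eq_false_iff_ne.mpr hqp
      rw [hif, if_neg (by simp)]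
      refine ⟨?_, ?_, ?_⟩
      · rw [tailTrue_concat]
        cases p with
        | false => simp
        | true =>
          have hq : q = false := by cases q with | false => rfl | true => exact absurd rfl hqp
          subst hq
          simp at hs ⊢
          omega
      · rw [maxTrue_concat]
        cases p with
        | false => simpa using hm
        | true =>
          have hq : q = false := by cases q with | false => rfl | true => exact absurd rfl hqp
          subst hq
          simp at hs ⊢
          omega
      · intro g hg
        rcases List.mem_append.mp hg with h1 | h1
        · exact hc g h1
        · simp at h1; subst h1; simp

theorem ciagLoop_eq_maxTrue :
    ∀ (xs : List Int) (rle : List (Bool × Int)) (s m : Int), RLEInv rle s m →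
      ciagLoop xs s m = maxTrue (xs.foldl (fun acc x => rleStep acc (isPrimeB x)) rle) := by
  intro xs
  induction xs with
  | nil =>
    intro rle s m h
    exact h.2.1
  | cons x rest ih =>
    intro rle s m h
    have hstep := RLEInv_step rle s m (isPrimeB x) h
    simp only [ciagLoop, List.foldl_cons, isPrime_eq]
    cases hp : isPrimeB x
    · simp only [Bool.false_eq_true, if_false]
      have := ih (rleStep rle false) 0 m (by simpa [hp] using hstep)
      simpa using this
    · simp only [if_true]
      have := ih (rleStep rle true) (s + 1) (max (s + 1) m) (by simpa [hp] using hstep)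
      simpa using this

theorem counts_final (xs : List Int) :
    ∀ rle, (∀ g ∈ rle, 1 ≤ g.2) →
      ∀ g ∈ (xs.foldl (fun acc x => rleStep acc (isPrimeB x)) rle), 1 ≤ g.2 := by
  induction xs with
  | nil => intro rle h; simpa using h
  | cons x rest ih =>
    intro rle h
    simp only [List.foldl_cons]
    apply ih
    intro g hg
    have := RLEInv_step rle (tailTrue rle) (maxTrue rle) (isPrimeB x) ⟨rfl, rfl, h⟩
    exact this.2.2 g hg

theorem max?_getD_eq_foldl (L : List Int) (hL : ∀ x ∈ L, 1 ≤ x) :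
    (PySem.List.max? L (fun y => y)).getD 0 = L.foldl max 0 := by
  cases L with
  | nil => simp [PySem.List.max?]
  | cons x t =>
    rw [PySem.List.max?_id_cons]
    have hx : max 0 x = x := by
      have := hL x (by simp); omega
    simp [hx]

-- ===== VERDICT (by name: the statement is the Claim_ definition above) =====
theorem ciag_spec : Claim_equal_ciag := by
  intro liczby _
  unfold Spec_ciag ciag ciag_alt
  rw [ciagLoop_eq_maxTrue liczby [] 0 0 ⟨rfl, rfl, by simp⟩]
  rw [max?_getD_eq_foldl]
  · rfl
  · intro x hx
    obtain ⟨g, hg, hpick⟩ := List.mem_filterMap.mp hx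
    have := counts_final liczby [] (by simp) g hg
    by_cases hp : g.1 = true <;> simp [hp] at hpick <;> omega
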